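-- pv_equiv track=rewrite | github.com/OpenQuantumDesign/oqd-dataschema | src/oqd_dataschema/utils.py | _is_list_unique
-- ===== SOURCE A (Python) =====
-- def _is_list_unique(data):
--     seen = set()
--     duplicates = set()
--     for element in data:
--         if element in duplicates:
--             continue
--
--         if element in seen:
--             duplicates.add(element)
--             continue
--
--         seen.add(element)
--
--     return (duplicates == set(), duplicates)
-- ===== SOURCE B (Python) =====
-- def _is_list_unique(data):
--     first = {}
--     for i, x in enumerate(data):
--         first.setdefault(x, i)
--     duplicates = {x for i, x in enumerate(data) if first[x] != i}
--     return (not duplicates, duplicates)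
-- ===== Notes on version B (the rewrite author's own statement) =====
-- stated objective: alternative
-- what changed: Replaces A's single-pass dual-set (seen/duplicates) bookkeeping by a two-stage strategy: a first pass builds a dict of each element's first-occurrence index via setdefault, then a set comprehension over enumerate(data) collects every element whose index is not its first-occurrence index.
import Mathlib
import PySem

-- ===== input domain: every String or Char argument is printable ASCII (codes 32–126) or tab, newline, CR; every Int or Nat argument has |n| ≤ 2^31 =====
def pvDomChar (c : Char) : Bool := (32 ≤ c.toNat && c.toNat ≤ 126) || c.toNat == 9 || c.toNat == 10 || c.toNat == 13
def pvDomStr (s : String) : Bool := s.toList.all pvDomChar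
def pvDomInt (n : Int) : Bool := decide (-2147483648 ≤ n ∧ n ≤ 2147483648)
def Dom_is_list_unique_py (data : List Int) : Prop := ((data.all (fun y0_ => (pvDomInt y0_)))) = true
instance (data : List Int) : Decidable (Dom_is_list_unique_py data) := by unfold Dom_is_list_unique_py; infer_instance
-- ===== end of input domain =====

-- B replaces A's single-pass dual-set bookkeeping by two stages: a dict of first-occurrence
-- indices built with setdefault, then a set comprehension keeping every element whose index
-- is not its first-occurrence index (alternative decomposition; same cost).

-- ===== PORT A =====
-- loop body of A: 'if element in duplicates: continue; if element in seen: duplicates.add(element); continue; seen.add(element)'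
def isluStepA (st : List Int × List Int) (element : Int) : List Int × List Int :=
  if PySem.Set.contains st.2 element then st
  else if PySem.Set.contains st.1 element then (st.1, PySem.Set.add st.2 element)
  else (PySem.Set.add st.1 element, st.2)

def is_list_unique_py (data : List Int) : Bool × List Int :=
  let st := data.foldl isluStepA (PySem.Set.empty, PySem.Set.empty)
  (PySem.Set.equal st.2 PySem.Set.empty, st.2)

-- ===== PORT B =====
-- 'first = {}; for i, x in enumerate(data): first.setdefault(x, i)'
def isluFirst (data : List Int) : PySem.Dict Int Int :=
  (PySem.List.enumerate data).foldl (fun d p => PySem.Dict.setdefault d p.2 p.1) ⟨[]⟩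

-- '{x for i, x in enumerate(data) if first[x] != i}'; 'first[x]' is ported as getD,
-- exact here because every element of data is a key of 'first' (no KeyError possible).
def is_list_unique_py_alt (data : List Int) : Bool × List Int :=
  let first := isluFirst data
  let duplicates := (PySem.List.enumerate data).foldl
      (fun s p => if PySem.Dict.getD first p.2 p.1 ≠ p.1 then PySem.Set.add s p.2 else s)
      PySem.Set.empty
  (duplicates.isEmpty, duplicates)

-- ===== PRECONDITION & SPEC =====
def Spec_is_list_unique_py (data : List Int) (out : Bool × List Int) : Prop := out = is_list_unique_py_alt data
instance (data : List Int) (out : Bool × List Int) : Decidable (Spec_is_list_unique_py data out) := by unfold Spec_is_list_unique_py; infer_instance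

-- ===== CLAIM (what is proved, stated in full; the proofs are below) =====
def Claim_equal_is_list_unique_py : Prop := ∀ (data : List Int), Dom_is_list_unique_py data → Spec_is_list_unique_py data (is_list_unique_py data)

-- ===== LEMMAS AND PROOFS =====

-- The first-occurrence dict: get? of the setdefault fold is the first index (offset by s).
lemma islu_first_get? : ∀ (l : List Int) (s : Int) (d : PySem.Dict Int Int) (k : Int),
    PySem.Dict.get? ((PySem.List.enumerate l s).foldl (fun d p => PySem.Dict.setdefault d p.2 p.1) d) k
    = (PySem.Dict.get? d k).or ((PySem.List.index? l k).map (fun n => s + (n : Int))) := by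
  intro l
  induction l with
  | nil => intro s d k; simp [PySem.List.enumerate_nil, PySem.List.index?]
  | cons x t ih =>
    intro s d k
    rw [PySem.List.enumerate_cons, List.foldl_cons, ih]
    by_cases hk : k = x
    · subst hk
      rw [PySem.Dict.get?_setdefault_self, PySem.List.index?_cons_self]
      cases h : PySem.Dict.get? d k with
      | none => simp
      | some v => simp
    · rw [PySem.Dict.get?_setdefault_of_ne _ _ hk, PySem.List.index?_cons_of_ne _ (fun h => hk h.symm)]
      cases h : PySem.Dict.get? d k with
      | none =>
        simp only [Option.none_or]
        cases hi : PySem.List.index? t k with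
        | none => simp
        | some n => simp; ring
      | some v => simp

-- The comprehension's condition 'first[x] != i' at position k is 'x occurs in data[:k]'.
lemma islu_cond_iff (data : List Int) (k : Nat) (hk : k < data.length) :
    (PySem.Dict.getD (isluFirst data) data[k] (k : Int) ≠ (k : Int)) ↔ data[k] ∈ data.take k := by
  have hmem : data[k] ∈ data := List.getElem_mem hk
  obtain ⟨n0, hn0⟩ := Option.isSome_iff_exists.1 ((PySem.List.index?_isSome_iff data data[k]).2 hmem)
  obtain ⟨hlt, hval, hfirst⟩ := PySem.List.getElem_of_index?_eq_some hn0
  have hget : PySem.Dict.getD (isluFirst data) data[k] (k : Int) = (n0 : Int) := by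
    unfold isluFirst
    unfold PySem.Dict.getD
    rw [islu_first_get?, hn0]
    simp [PySem.Dict.get?]
  rw [hget]
  have hle : n0 ≤ k := by
    by_contra h
    exact hfirst k (by omega) rfl
  constructor
  · intro hne
    have hlt' : n0 < k := by omega
    rw [← hval]
    have : (data.take k)[n0]'(by simp; omega) = data[n0] := List.getElem_take
    exact this ▸ List.getElem_mem _
  · intro hmem' hne
    have hn0k : n0 = k := by omega
    subst hn0k
    obtain ⟨j, hj, hjv⟩ := List.mem_iff_getElem.1 hmem'
    have hjlen : j < data.length := lt_of_lt_of_le hj (by simp)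
    have hjk : j < n0 := by simp at hj; omega
    exact hfirst j hjk (by rw [← hjv]; exact (List.getElem_take).symm)

-- B's fold equals the prefix-membership fold.
lemma islu_alt_fold_eq (data : List Int) :
    (PySem.List.enumerate data).foldl
      (fun s p => if PySem.Dict.getD (isluFirst data) p.2 p.1 ≠ p.1 then PySem.Set.add s p.2 else s)
      PySem.Set.empty
    = (PySem.List.enumerate data).foldl
      (fun s p => if (PySem.List.slice data none (some p.1)).contains p.2 then PySem.Set.add s p.2 else s)
      PySem.Set.empty := by
  apply PySem.List.foldl_congr_mem
  intro acc p hp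
  obtain ⟨k, hk, rfl⟩ := (PySem.List.mem_enumerate_iff data 0 p).1 hp
  simp only [zero_add]
  have hcond := islu_cond_iff data k hk
  have hslice : PySem.List.slice data none (some (k : Int)) = data.take k :=
    PySem.List.slice_to_natCast data k
  rw [hslice]
  by_cases h : data[k] ∈ data.take k
  · rw [if_pos (hcond.2 h), if_pos (by simpa using h)]
  · rw [if_neg (fun hc => h (hcond.1 hc)), if_neg (by simpa using h)]

-- A's loop against the prefix-membership fold (invariant over the processed prefix).
lemma islu_loop_eq (r : List Int) : ∀ (pre dups : List Int),
    (∀ y ∈ dups, y ∈ pre) →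
    (PySem.List.enumerate r (pre.length : Int)).foldl
      (fun s p => if (PySem.List.slice (pre ++ r) none (some p.1)).contains p.2
                  then PySem.Set.add s p.2 else s) dups
    = (r.foldl isluStepA (PySem.Set.ofList pre, dups)).2 := by
  induction r with
  | nil => intro pre dups _; simp
  | cons x t ih =>
    intro pre dups hsub
    rw [PySem.List.enumerate_cons, List.foldl_cons, List.foldl_cons]
    have hslice : PySem.List.slice (pre ++ x :: t) none (some (pre.length : Int)) = pre := by
      rw [PySem.List.slice_to_natCast]
      exact List.take_left
    have hassoc : pre ++ x :: t = (pre ++ [x]) ++ t := by simp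
    have hlen : (pre.length : Int) + 1 = ((pre ++ [x]).length : Int) := by
      simp
    by_cases hx : x ∈ pre
    · have hofl : PySem.Set.ofList (pre ++ [x]) = PySem.Set.ofList pre := by
        rw [PySem.Set.ofList_eq_foldl, List.foldl_append]
        simp only [List.foldl_cons, List.foldl_nil]
        rw [← PySem.Set.ofList_eq_foldl]
        exact PySem.Set.add_of_mem (by simpa [PySem.Set.mem_ofList] using hx)
      have hB : (if (PySem.List.slice (pre ++ x :: t) none (some (pre.length : Int))).contains x
                 then PySem.Set.add dups x else dups) = PySem.Set.add dups x := by
        rw [hslice]; simp [hx]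
      have hA : isluStepA (PySem.Set.ofList pre, dups) x = (PySem.Set.ofList pre, PySem.Set.add dups x) := by
        unfold isluStepA
        by_cases hd : x ∈ dups
        · simp [hd]
        · simp [hd, hx]
      rw [hB, hA, hassoc, hlen, ← hofl]
      refine ih (pre ++ [x]) (PySem.Set.add dups x) ?_
      intro y hy
      rcases (PySem.Set.mem_add dups x y).1 hy with h | h
      · exact List.mem_append_left _ (hsub y h)
      · simp [h]
    · have hxd : x ∉ dups := fun h => hx (hsub x h)
      have hB : (if (PySem.List.slice (pre ++ x :: t) none (some (pre.length : Int))).contains x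
                 then PySem.Set.add dups x else dups) = dups := by
        rw [hslice]; simp [hx]
      have hA : isluStepA (PySem.Set.ofList pre, dups) x = (PySem.Set.add (PySem.Set.ofList pre) x, dups) := by
        unfold isluStepA
        simp [hxd, hx, PySem.Set.mem_ofList]
      have hofl : PySem.Set.ofList (pre ++ [x]) = PySem.Set.add (PySem.Set.ofList pre) x := by
        rw [PySem.Set.ofList_eq_foldl, List.foldl_append]
        simp only [List.foldl_cons, List.foldl_nil]
        rw [← PySem.Set.ofList_eq_foldl]
      rw [hB, hA, hassoc, hlen, ← hofl]
      refine ih (pre ++ [x]) dups ?_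
      intro y hy
      exact List.mem_append_left _ (hsub y hy)

lemma islu_dups_eq (data : List Int) :
    (PySem.List.enumerate data).foldl
      (fun s p => if (PySem.List.slice data none (some p.1)).contains p.2
                  then PySem.Set.add s p.2 else s) PySem.Set.empty
    = (data.foldl isluStepA (PySem.Set.empty, PySem.Set.empty)).2 := by
  have h := islu_loop_eq data [] [] (by intro y hy; cases hy)
  simpa [PySem.List.enumerate, PySem.Set.empty] using h

-- Python's 's == set()' equals 'not s'.
lemma islu_equal_empty (s : List Int) : PySem.Set.equal s PySem.Set.empty = s.isEmpty := by
  cases s with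
  | nil => rfl
  | cons x t =>
    simp only [List.isEmpty_cons]
    rw [Bool.eq_false_iff]
    intro h
    have := (PySem.Set.equal_iff _ _).1 h x
    simp [PySem.Set.empty] at this

-- ===== VERDICT (by name: the statement is the Claim_ definition above) =====
theorem is_list_unique_py_spec : Claim_equal_is_list_unique_py := by
  intro data _
  unfold Spec_is_list_unique_py is_list_unique_py is_list_unique_py_alt
  simp only [islu_alt_fold_eq, islu_dups_eq, islu_equal_empty]
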